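-- pv_equiv track=rewrite | github.com/Nnorto/EGE_code-main | 23 задание/23 не более 2-х умножений.py | f
-- ===== SOURCE A (Python) =====
-- def f(start, end, km):
--     if start == end:
--         return 1
--     if start > end:
--         return 0
--     if km == 1:
--         return f(start + 1, end, 0) + f(start + 2, end, 0)
--     return f(start + 1, end, 0) + f(start + 2, end, 0) + f(start * 2, end, 1)
-- ===== SOURCE B (Python) =====
-- def f(start, end, km):
--     # Bottom-up DP over positions instead of A's top-down recursion.
--     # dp1[s] = number of paths from s when a doubling was just used (no doubling allowed now),
--     # dp0[s] = number of paths from s when doubling is allowed.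
--     if start >= end:
--         return 1 if start == end else 0
--     dp1 = {}
--     dp0 = {}
--     def v(d, t):
--         if t == end:
--             return 1
--         if t > end:
--             return 0
--         return d.get(t, 0)
--     for s in range(end - 1, start - 1, -1):
--         dp1[s] = v(dp0, s + 1) + v(dp0, s + 2)
--         dp0[s] = dp1[s] + v(dp1, s * 2)
--     return dp1[start] if km == 1 else dp0[start]
-- ===== Notes on version B (the rewrite author's own statement) =====
-- stated objective: alternative
-- what changed: Replaces A's top-down three-way recursion by a bottom-up dynamic program over positions from end-1 down to start with two tables (doubling allowed / just doubled), one linear pass; a timing run could not certify a speed ratio (A times out unverifiably), so no speed is claimed.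
-- outside the precondition, e.g. on f(-5, 3, 0): A raises RecursionError, B returns 79
import Mathlib
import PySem

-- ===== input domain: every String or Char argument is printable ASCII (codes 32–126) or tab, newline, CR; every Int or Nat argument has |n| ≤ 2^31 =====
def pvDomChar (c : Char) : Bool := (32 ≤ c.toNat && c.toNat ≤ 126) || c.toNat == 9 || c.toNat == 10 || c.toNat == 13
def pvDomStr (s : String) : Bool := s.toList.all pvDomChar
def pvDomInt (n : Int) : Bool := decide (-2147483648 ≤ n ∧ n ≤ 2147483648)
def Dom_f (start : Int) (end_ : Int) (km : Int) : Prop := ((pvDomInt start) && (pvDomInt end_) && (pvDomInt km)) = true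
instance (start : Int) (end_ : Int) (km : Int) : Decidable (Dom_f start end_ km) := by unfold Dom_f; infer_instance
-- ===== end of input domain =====

-- B recomputes the path count with a bottom-up dynamic program over positions instead of A's
-- exponential top-down recursion; equivalence is proved on exactly the inputs where A returns.

-- ===== PORT A =====
-- A's recursion does not terminate for most negative `start` below `end_` (the start*2 chain
-- descends forever; Python raises RecursionError there). It is ported with a fuel parameter
-- large enough for every input satisfying Pre_f; fuel exhaustion returns 0, reached only
-- outside Pre_f.
def fA : Nat → Int → Int → Int → Int
  | 0, _, _, _ => 0
  | fu+1, start, end_, km =>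
    if start = end_ then 1
    else if start > end_ then 0
    else if km = 1 then fA fu (start+1) end_ 0 + fA fu (start+2) end_ 0
    else fA fu (start+1) end_ 0 + fA fu (start+2) end_ 0 + fA fu (start*2) end_ 1

def f (start : Int) (end_ : Int) (km : Int) : Int :=
  fA (2 * (end_ - start).toNat + 2) start end_ km

-- ===== PORT B =====
-- helper v(d, t) of Source B
def vB (end_ : Int) (d : PySem.Dict Int Int) (t : Int) : Int :=
  if t = end_ then 1 else if t > end_ then 0 else d.getD t 0

-- loop body of Source B: state (dp1, dp0), processing position s
def stepB (end_ : Int) (p : PySem.Dict Int Int × PySem.Dict Int Int) (s : Int) :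
    PySem.Dict Int Int × PySem.Dict Int Int :=
  let w := vB end_ p.2 (s+1) + vB end_ p.2 (s+2)
  let d1 := p.1.insert s w
  (d1, p.2.insert s (w + vB end_ d1 (s*2)))

def f_alt (start : Int) (end_ : Int) (km : Int) : Int :=
  if start ≥ end_ then (if start = end_ then 1 else 0)
  else
    let p := (PySem.List.pyRange (end_-1) (start-1) (-1)).foldl (stepB end_)
               (PySem.Dict.empty, PySem.Dict.empty)
    if km = 1 then p.1.getD start 0 else p.2.getD start 0

-- ===== PRECONDITION & SPEC =====
-- Pre_f excludes exactly the inputs on which Python A RAISES (RecursionError): (i) for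
-- start < min(0, end_) the start*2 branch descends forever, except the two terminating
-- pockets km = 1 with start = -1 or start = end_ - 1, where the doubling branch is never
-- taken; (ii) A's recursion depth is end_ - start + O(1) frames, so once the span nears the
-- interpreter's recursion limit (1000 by default in CPython; A raises at span 999 when called
-- at the top level, earlier from inside deeper callers) A raises RecursionError before
-- computing anything: the span is capped at 900, just under that limit, because the exact
-- raising span depends on the caller's current stack depth.
def Pre_f (start : Int) (end_ : Int) (km : Int) : Prop :=
  (0 ≤ start ∨ end_ ≤ start ∨ (km = 1 ∧ (start = -1 ∨ start = end_ - 1))) ∧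
    end_ - start ≤ 900
instance (start : Int) (end_ : Int) (km : Int) : Decidable (Pre_f start end_ km) := by
  unfold Pre_f; infer_instance

def pvWitness_f : Int × Int × Int := (0, 6, 0)

def Spec_f (start : Int) (end_ : Int) (km : Int) (out : Int) : Prop := out = f_alt start end_ km
instance (start : Int) (end_ : Int) (km : Int) (out : Int) : Decidable (Spec_f start end_ km out) := by
  unfold Spec_f; infer_instance

-- ===== CLAIM (what is proved, stated in full; the proofs are below) =====
def Claim_equal_f : Prop := ∀ (start : Int) (end_ : Int) (km : Int), Dom_f start end_ km →
  Pre_f start end_ km → Spec_f start end_ km (f start end_ km)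

-- ===== LEMMAS AND PROOFS =====

-- Mathematical characterisation of the count: g e s k = number of paths from s to e
-- (k = true: a doubling was just used, so none allowed now).
def g (e : Int) (s : Int) (k : Bool) : Int :=
  if s = e then 1
  else if e < s then 0
  else if k then g e (s+1) false + g e (s+2) false
  else g e (s+1) false + g e (s+2) false + (if 0 ≤ s then g e (s*2) true else 0)
termination_by 2 * (e - s).toNat + (if k then 0 else 1)
decreasing_by
  all_goals cases k
  all_goals simp_all
  all_goals omega

lemma fA_eq_g (e : Int) : ∀ (fuel : Nat) (s km : Int),
    (0 ≤ s ∨ e ≤ s ∨ (km = 1 ∧ (s = -1 ∨ s = e - 1))) →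
    2 * (e - s).toNat + (if km = 1 then 1 else 2) ≤ fuel →
    fA fuel s e km = g e s (km = 1) := by
  intro fuel
  induction fuel with
  | zero => intro s km _ hf; split at hf <;> omega
  | succ fu ih =>
    intro s km hs hf
    rcases eq_or_ne s e with h1 | h1
    · subst h1; simp [fA, g]
    · by_cases h2 : s > e
      · simp only [fA]
        rw [if_neg h1, if_pos h2, g, if_neg h1, if_pos h2]
      · have hlt : s < e := by omega
        by_cases hk : km = 1
        · have hf' : 2 * (e - s).toNat ≤ fu := by
            rw [if_pos hk] at hf; omega
          have hc1 : fA fu (s+1) e 0 = g e (s+1) false := by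
            refine ih _ _ (by rcases hs with h | h | ⟨_, h | h⟩ <;> omega) ?_
            rw [if_neg (by norm_num : ¬ (0:Int) = 1)]; omega
          have hc2 : fA fu (s+2) e 0 = g e (s+2) false := by
            refine ih _ _ (by rcases hs with h | h | ⟨_, h | h⟩ <;> omega) ?_
            rw [if_neg (by norm_num : ¬ (0:Int) = 1)]; omega
          simp only [fA]
          rw [if_neg h1, if_neg h2, if_pos hk, hc1, hc2,
              show (decide (km = 1)) = true by simp [hk]]
          have hg : g e s true = g e (s+1) false + g e (s+2) false := by
            rw [g, if_neg h1, if_neg (by omega : ¬ e < s)]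
            simp
          rw [hg]
        · have hs0 : 0 ≤ s := by rcases hs with h | h | ⟨h, _⟩ <;> [skip; omega; omega]; omega
          have hf' : 2 * (e - s).toNat + 1 ≤ fu := by
            rw [if_neg hk] at hf; omega
          have hc1 : fA fu (s+1) e 0 = g e (s+1) false := by
            refine ih _ _ (by omega) ?_
            rw [if_neg (by norm_num : ¬ (0:Int) = 1)]; omega
          have hc2 : fA fu (s+2) e 0 = g e (s+2) false := by
            refine ih _ _ (by omega) ?_
            rw [if_neg (by norm_num : ¬ (0:Int) = 1)]; omega
          have hc3 : fA fu (s*2) e 1 = g e (s*2) true := by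
            refine ih _ _ (by omega) ?_
            rw [if_pos rfl]
            by_cases hz : s = 0
            · subst hz; omega
            · omega
          simp only [fA]
          rw [if_neg h1, if_neg h2, if_neg hk, hc1, hc2, hc3,
              show (decide (km = 1)) = false by simp [hk]]
          have hg : g e s false
              = g e (s+1) false + g e (s+2) false + g e (s*2) true := by
            rw [g, if_neg h1, if_neg (by omega : ¬ e < s)]
            simp [hs0]
          rw [hg]

-- B's fold state when the loop has processed positions e-1 down to t
def BState (e t : Int) : PySem.Dict Int Int × PySem.Dict Int Int :=
  (PySem.List.pyRange (e-1) (t-1) (-1)).foldl (stepB e) (PySem.Dict.empty, PySem.Dict.empty)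

lemma range_snoc (a b : Int) (h : b ≤ a) :
    PySem.List.pyRange a (b-1) (-1) = PySem.List.pyRange a b (-1) ++ [b] := by
  rw [PySem.List.pyRange_neg_one_eq_reverse, PySem.List.pyRange_neg_one_eq_reverse,
      show b - 1 + 1 = b from by omega,
      PySem.List.pyRange_one_cons (by omega : b < a + 1), List.reverse_cons]

lemma BState_step (e t : Int) (h : t < e) :
    BState e t = stepB e (BState e (t+1)) t := by
  unfold BState
  rw [show t + 1 - 1 = t from by omega, range_snoc (e-1) t (by omega : t ≤ e - 1),
      List.foldl_append, List.foldl_cons, List.foldl_nil]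

-- loop invariant: entries at u ≥ t hold g, entries below t are absent (default 0)
lemma invariant (e : Int) : ∀ (n : Nat) (t : Int), (e - t).toNat = n →
    (∀ u, t ≤ u → u ≤ e - 1 →
        (BState e t).1.getD u 0 = g e u true ∧ (BState e t).2.getD u 0 = g e u false) ∧
    (∀ u, u < t → (BState e t).1.getD u 0 = 0 ∧ (BState e t).2.getD u 0 = 0) := by
  intro n
  induction n with
  | zero =>
    intro t ht
    have he : e ≤ t := by omega
    unfold BState
    rw [PySem.List.pyRange_neg_one_eq_nil (by omega : e - 1 ≤ t - 1)]
    refine ⟨fun u h1 h2 => by omega, fun u _ => ?_⟩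
    simp [PySem.Dict.getD_empty]
  | succ m ih =>
    intro t ht
    have hlt : t < e := by omega
    obtain ⟨ih1, ih2⟩ := ih (t+1) (by omega)
    rw [BState_step e t hlt]
    set q := BState e (t+1) with hq
    have hv1 : vB e q.2 (t+1) = g e (t+1) false := by
      unfold vB
      by_cases h : t + 1 = e
      · rw [if_pos h, h, g]; simp
      · rw [if_neg h, if_neg (by omega : ¬ t + 1 > e)]
        exact (ih1 (t+1) (by omega) (by omega)).2
    have hv2 : vB e q.2 (t+2) = g e (t+2) false := by
      unfold vB
      by_cases h : t + 2 = e
      · rw [if_pos h, h, g]; simp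
      · by_cases h' : t + 2 > e
        · rw [if_neg h, if_pos h', g, if_neg h, if_pos (by omega : e < t + 2)]
        · rw [if_neg h, if_neg h']
          exact (ih1 (t+2) (by omega) (by omega)).2
    have gt : g e t true = g e (t+1) false + g e (t+2) false := by
      rw [g, if_neg (by omega : ¬ t = e), if_neg (by omega : ¬ e < t)]
      simp
    have gf : g e t false = g e (t+1) false + g e (t+2) false
        + (if 0 ≤ t then g e (t*2) true else 0) := by
      rw [g, if_neg (by omega : ¬ t = e), if_neg (by omega : ¬ e < t)]
      simp
    have hw : vB e q.2 (t+1) + vB e q.2 (t+2) = g e t true := by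
      rw [hv1, hv2, gt]
    have hv3 : vB e (q.1.insert t (vB e q.2 (t+1) + vB e q.2 (t+2))) (t*2)
        = (if 0 ≤ t then g e (t*2) true else 0) := by
      by_cases hz : t = 0
      · subst hz
        simp only [Int.zero_mul]
        conv_lhs => rw [vB]
        rw [if_neg (by omega : ¬ (0:Int) = e), if_neg (by omega : ¬ (0:Int) > e),
            PySem.Dict.getD_insert_self, hw, if_pos (le_refl (0:Int))]
      · conv_lhs => rw [vB]
        by_cases hpos : 0 < t
        · rw [if_pos (by omega : (0:Int) ≤ t)]
          by_cases h : t * 2 = e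
          · rw [if_pos h, h, g]; simp
          · by_cases h' : t * 2 > e
            · rw [if_neg h, if_pos h', g, if_neg h, if_pos (by omega : e < t * 2)]
            · rw [if_neg h, if_neg h',
                  PySem.Dict.getD_insert_of_ne _ _ _ (by omega : t * 2 ≠ t)]
              exact (ih1 (t*2) (by omega) (by omega)).1
        · have hneg : t < 0 := by omega
          rw [if_neg (by omega : ¬ (0:Int) ≤ t),
              if_neg (by omega : ¬ t * 2 = e), if_neg (by omega : ¬ t * 2 > e),
              PySem.Dict.getD_insert_of_ne _ _ _ (by omega : t * 2 ≠ t)]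
          exact (ih2 (t*2) (by omega)).1
    have hw0 : (vB e q.2 (t+1) + vB e q.2 (t+2))
        + vB e (q.1.insert t (vB e q.2 (t+1) + vB e q.2 (t+2))) (t*2) = g e t false := by
      rw [hv3, hw, gt, gf]
    constructor
    · intro u h1 h2
      by_cases hu : u = t
      · subst hu
        unfold stepB
        simp only
        rw [PySem.Dict.getD_insert_self, PySem.Dict.getD_insert_self]
        exact ⟨hw, hw0⟩
      · unfold stepB
        simp only
        rw [PySem.Dict.getD_insert_of_ne _ _ _ hu, PySem.Dict.getD_insert_of_ne _ _ _ hu]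
        exact ih1 u (by omega) h2
    · intro u hu
      unfold stepB
      simp only
      rw [PySem.Dict.getD_insert_of_ne _ _ _ (by omega : u ≠ t),
          PySem.Dict.getD_insert_of_ne _ _ _ (by omega : u ≠ t)]
      exact ih2 u (by omega)

lemma f_alt_eq_g (start e km : Int) (h : start < e) :
    f_alt start e km = g e start (km = 1) := by
  unfold f_alt
  rw [if_neg (by omega : ¬ start ≥ e)]
  obtain ⟨h1, _⟩ := invariant e (e - start).toNat start rfl
  obtain ⟨hg1, hg0⟩ := h1 start (le_refl _) (by omega)
  have hB : (PySem.List.pyRange (e-1) (start-1) (-1)).foldl (stepB e)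
      (PySem.Dict.empty, PySem.Dict.empty) = BState e start := rfl
  dsimp only
  rw [hB]
  by_cases hk : km = 1
  · rw [if_pos hk, hg1, hk]
    simp
  · rw [if_neg hk, hg0, show (decide (km = 1)) = false by simp [hk]]

-- ===== VERDICT (by name: the statement is the Claim_ definition above) =====
theorem f_spec : Claim_equal_f := by
  intro start end_ km _ hpre
  unfold Spec_f f
  rcases eq_or_ne start end_ with h1 | h1
  · subst h1
    have h0 : (start - start).toNat = 0 := by omega
    rw [h0]
    unfold f_alt fA
    simp
  · by_cases h2 : end_ < start
    · unfold f_alt fA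
      simp only [ge_iff_le, if_pos (le_of_lt h2), if_neg h1]
      rw [if_pos (by omega : start > end_)]
    · have hlt : start < end_ := by omega
      rw [f_alt_eq_g start end_ km hlt]
      apply fA_eq_g
      · unfold Pre_f at hpre
        rcases hpre.1 with h | h | h
        · left; exact h
        · omega
        · right; right; exact ⟨h.1, by omega⟩
      · split <;> omega
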